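-- pv_equiv track=rewrite | github.com/AVZemskov/Regular_expressions | Test_Regular_expressions.py | normalize_fio
-- ===== SOURCE A (Python) =====
-- def normalize_fio(contact):
--     full_name_str = " ".join(contact[:3]).strip()
--
--     parts = []
--     for part in full_name_str.split():
--         if ',' in part:
--             parts.extend(part.split(','))
--         else:
--             parts.append(part)
--
--     parts = [p for p in parts if p]
--
--     lastname = parts[0] if len(parts) > 0 else ""
--     firstname = parts[1] if len(parts) > 1 else ""
--     surname = parts[2] if len(parts) > 2 else ""
--
--     return lastname, firstname, surname
-- ===== SOURCE B (Python) =====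
-- def normalize_fio(contact):
--     parts = []
--     cur = ""
--     for ch in " ".join(contact[:3]):
--         if ch == ',' or ch.isspace():
--             if cur:
--                 parts.append(cur)
--                 cur = ""
--         else:
--             cur += ch
--     if cur:
--         parts.append(cur)
--     lastname = parts[0] if len(parts) > 0 else ""
--     firstname = parts[1] if len(parts) > 1 else ""
--     surname = parts[2] if len(parts) > 2 else ""
--     return lastname, firstname, surname
-- ===== Notes on version B (the rewrite author's own statement) =====
-- stated objective: simpler
-- what changed: Replaces A's join/strip/split()/per-token comma-split/empty-filter pipeline by a single one-pass character scanner that treats whitespace and commas uniformly as separators.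
import Mathlib
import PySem

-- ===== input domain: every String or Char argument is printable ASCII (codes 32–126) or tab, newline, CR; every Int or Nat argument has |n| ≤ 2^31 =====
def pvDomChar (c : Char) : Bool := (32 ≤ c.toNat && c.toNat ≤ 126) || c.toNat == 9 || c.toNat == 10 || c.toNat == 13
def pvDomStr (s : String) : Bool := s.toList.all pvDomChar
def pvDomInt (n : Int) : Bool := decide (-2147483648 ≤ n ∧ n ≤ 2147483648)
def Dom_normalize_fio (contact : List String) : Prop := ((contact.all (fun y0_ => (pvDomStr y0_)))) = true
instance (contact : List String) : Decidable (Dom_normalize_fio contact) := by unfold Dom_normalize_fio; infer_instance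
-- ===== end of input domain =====

-- B replaces A's join/strip/split()/per-token comma-split/empty-filter pipeline by one single-pass
-- character scanner treating whitespace and commas uniformly as separators (objective: simpler).

-- ===== PORT A =====
def normalize_fio (contact : List String) : String × String × String :=
  let full_name_str := PySem.Str.strip (PySem.Str.join " " (PySem.List.slice contact none (some 3)))
  let parts := (PySem.Str.split₀ full_name_str).foldl
    (fun parts part =>
      if PySem.Str.isIn "," part then parts ++ (PySem.Str.split? part ",").getD []
      else parts ++ [part]) []
  let parts2 := parts.filter (fun p => p ≠ "")
  let lastname := if parts2.length > 0 then parts2.getD 0 "" else ""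
  let firstname := if parts2.length > 1 then parts2.getD 1 "" else ""
  let surname := if parts2.length > 2 then parts2.getD 2 "" else ""
  (lastname, firstname, surname)

-- ===== PORT B =====
def normalize_fio_alt (contact : List String) : String × String × String :=
  let joined := PySem.Str.join " " (PySem.List.slice contact none (some 3))
  let st := joined.toList.foldl
    (fun (st : List String × List Char) ch =>
      if ch == ',' || PySem.Chars.isspace ch then
        (if st.2.isEmpty then st else (st.1 ++ [String.ofList st.2], []))
      else (st.1, st.2 ++ [ch])) ([], [])
  let parts := if st.2.isEmpty then st.1 else st.1 ++ [String.ofList st.2]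
  let lastname := if parts.length > 0 then parts.getD 0 "" else ""
  let firstname := if parts.length > 1 then parts.getD 1 "" else ""
  let surname := if parts.length > 2 then parts.getD 2 "" else ""
  (lastname, firstname, surname)

-- ===== PRECONDITION & SPEC =====
def Spec_normalize_fio (contact : List String) (out : String × String × String) : Prop := out = normalize_fio_alt contact
instance (contact : List String) (out : String × String × String) : Decidable (Spec_normalize_fio contact out) := by unfold Spec_normalize_fio; infer_instance

-- ===== CLAIM (what is proved, stated in full; the proofs are below) =====
def Claim_equal_normalize_fio : Prop := ∀ (contact : List String), Dom_normalize_fio contact → Spec_normalize_fio contact (normalize_fio contact)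

-- ===== LEMMAS AND PROOFS =====

-- canonical tokenizer: maximal runs of characters not satisfying p (pend = word in progress)
def pvToks (p : Char → Bool) (pend : List Char) : List Char → List (List Char)
  | [] => if pend.isEmpty then [] else [pend]
  | c :: rest =>
      if p c then (if pend.isEmpty then pvToks p [] rest else pend :: pvToks p [] rest)
      else pvToks p (pend ++ [c]) rest

-- B's separator predicate
def pvSep (c : Char) : Bool := c == ',' || PySem.Chars.isspace c

-- canonical comma split (Python s.split(','))
def pvCS : List Char → List (List Char)
  | [] => [[]]
  | c :: rest =>
      if c = ',' then [] :: pvCS rest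
      else match pvCS rest with
        | [] => [[c]]
        | w :: ws => (c :: w) :: ws

theorem pvCS_ne_nil (l : List Char) : pvCS l ≠ [] := by
  cases l with
  | nil => simp [pvCS]
  | cons c rest =>
    simp only [pvCS]
    split_ifs
    · simp
    · cases h : pvCS rest <;> simp

theorem pv_dropLast_getLastD {α : Type} (l : List α) (d : α) (h : l ≠ []) :
    l.dropLast ++ [l.getLastD d] = l := by
  obtain ⟨l', a, rfl⟩ := l.eq_nil_or_concat.resolve_left h
  simp

theorem pv_getLastD_cons {α : Type} (a : α) (l : List α) (d : α) (h : l ≠ []) :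
    (a :: l).getLastD d = l.getLastD d := by
  cases l with | nil => simp_all | cons b t => simp

theorem pvCS_append_comma (p : List Char) : pvCS (p ++ [',']) = pvCS p ++ [[]] := by
  induction p with
  | nil => simp [pvCS]
  | cons d p' ih =>
    by_cases hd : d = ','
    · simp [pvCS, hd, ih]
    · cases h : pvCS p' with
      | nil => exact absurd h (pvCS_ne_nil p')
      | cons w ws => simp [pvCS, hd, ih, h]

theorem pvCS_append_other (p : List Char) (c : Char) (hc : c ≠ ',') :
    pvCS (p ++ [c]) = (pvCS p).dropLast ++ [(pvCS p).getLastD [] ++ [c]] := by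
  induction p with
  | nil => simp [pvCS, hc]
  | cons d p' ih =>
    by_cases hd : d = ','
    · cases h : pvCS p' with
      | nil => exact absurd h (pvCS_ne_nil p')
      | cons w ws => simp [pvCS, hd, ih, h]
    · cases h : pvCS p' with
      | nil => exact absurd h (pvCS_ne_nil p')
      | cons w ws =>
        cases ws with
        | nil => simp [pvCS, hd, ih, h]
        | cons y l => simp [pvCS, hd, ih, h, pv_getLastD_cons]

theorem pvCS_no_comma (p : List Char) (h : ',' ∉ p) : pvCS p = [p] := by
  induction p with
  | nil => simp [pvCS]
  | cons c rest ih =>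
    simp only [List.mem_cons, not_or] at h
    simp [pvCS, Ne.symm h.1, ih h.2]

-- split₀.go in terms of pvToks
theorem split0_go_eq (l : List Char) : ∀ (cur : List Char) (acc : List (List Char)),
    PySem.Chars.split₀.go l cur acc = acc.reverse ++ pvToks PySem.Chars.isspace cur.reverse l := by
  induction l with
  | nil =>
    intro cur acc
    simp only [PySem.Chars.split₀.go, pvToks]
    cases cur <;> simp
  | cons c rest ih =>
    intro cur acc
    simp only [PySem.Chars.split₀.go, pvToks]
    by_cases hc : PySem.Chars.isspace c
    · cases cur <;> simp [hc, ih]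
    · simp [hc, ih]

theorem split0_eq (s : List Char) : PySem.Chars.split₀ s = pvToks PySem.Chars.isspace [] s := by
  simp [PySem.Chars.split₀, split0_go_eq]

-- splitOn.go with separator "," in terms of pvCS
theorem splitOn_go_comma (fuel : Nat) : ∀ (l cur : List Char) (acc : List (List Char)),
    l.length ≤ fuel →
    PySem.Chars.splitOn.go [','] fuel l cur acc =
      acc.reverse ++ (match pvCS l with
        | [] => [cur.reverse]
        | w :: ws => (cur.reverse ++ w) :: ws) := by
  induction fuel with
  | zero =>
    intro l cur acc hl
    have : l = [] := by cases l <;> simp_all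
    subst this
    simp [PySem.Chars.splitOn.go, pvCS]
  | succ fuel ih =>
    intro l cur acc hl
    cases l with
    | nil => simp [PySem.Chars.splitOn.go, pvCS]
    | cons c rest =>
      simp only [List.length_cons, Nat.add_le_add_iff_right] at hl
      by_cases hc : c = ','
      · subst hc
        have hgo : PySem.Chars.splitOn.go [','] (fuel+1) (',' :: rest) cur acc =
            PySem.Chars.splitOn.go [','] fuel rest [] (cur.reverse :: acc) := by
          simp only [PySem.Chars.splitOn.go]
          simp [List.isPrefixOf]
        rw [hgo, ih rest [] _ hl]
        cases h : pvCS rest with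
        | nil => exact absurd h (pvCS_ne_nil rest)
        | cons w ws => simp [pvCS, h]
      · have hgo : PySem.Chars.splitOn.go [','] (fuel+1) (c :: rest) cur acc =
            PySem.Chars.splitOn.go [','] fuel rest (c :: cur) acc := by
          have hpre : List.isPrefixOf [','] (c :: rest) = false := by
            simp [List.isPrefixOf]
            exact fun h => absurd h.symm hc
          simp only [PySem.Chars.splitOn.go]
          simp [hpre]
        rw [hgo, ih rest _ _ hl]
        cases h : pvCS rest with
        | nil => exact absurd h (pvCS_ne_nil rest)
        | cons w ws => simp [pvCS, hc, h]

theorem splitOn_comma (s : List Char) : PySem.Chars.splitOn s [','] = pvCS s := by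
  rw [PySem.Chars.splitOn, splitOn_go_comma (s.length + 1) s [] [] (by omega)]
  cases h : pvCS s with
  | nil => exact absurd h (pvCS_ne_nil s)
  | cons w ws => simp

-- stripping whitespace does not change the whitespace tokenization
theorem pvToks_all_space (t : List Char) : ∀ pend, (∀ c ∈ t, PySem.Chars.isspace c = true) →
    pvToks PySem.Chars.isspace pend t = if pend.isEmpty then [] else [pend] := by
  induction t with
  | nil => intro pend _; simp [pvToks]
  | cons c rest ih =>
    intro pend h
    have hc := h c (by simp)
    have hrest : ∀ c ∈ rest, PySem.Chars.isspace c = true := fun d hd => h d (by simp [hd])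
    cases hp : pend.isEmpty <;> simp [pvToks, hc, hp, ih [] hrest]

theorem pvToks_append_space (s : List Char) : ∀ (pend t : List Char),
    (∀ c ∈ t, PySem.Chars.isspace c = true) →
    pvToks PySem.Chars.isspace pend (s ++ t) = pvToks PySem.Chars.isspace pend s := by
  induction s with
  | nil =>
    intro pend t h
    simp only [List.nil_append, pvToks]
    exact pvToks_all_space t pend h
  | cons c rest ih =>
    intro pend t h
    simp only [List.cons_append, pvToks]
    by_cases hc : PySem.Chars.isspace c <;> simp [hc, ih _ _ h]

theorem pvToks_lstrip (s : List Char) :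
    pvToks PySem.Chars.isspace [] (List.dropWhile PySem.Chars.isspace s) =
      pvToks PySem.Chars.isspace [] s := by
  induction s with
  | nil => simp
  | cons c rest ih =>
    by_cases hc : PySem.Chars.isspace c
    · simpa [hc, pvToks] using ih
    · simp [hc]

theorem pvToks_strip (s : List Char) :
    pvToks PySem.Chars.isspace [] (PySem.Chars.strip s) = pvToks PySem.Chars.isspace [] s := by
  unfold PySem.Chars.strip PySem.Chars.rstrip PySem.Chars.lstrip
  have hsplit : (List.dropWhile PySem.Chars.isspace (List.dropWhile PySem.Chars.isspace s).reverse).reverse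
      ++ (List.takeWhile PySem.Chars.isspace (List.dropWhile PySem.Chars.isspace s).reverse).reverse
      = List.dropWhile PySem.Chars.isspace s := by
    rw [← List.reverse_append, List.takeWhile_append_dropWhile, List.reverse_reverse]
  calc pvToks PySem.Chars.isspace [] (List.dropWhile PySem.Chars.isspace (List.dropWhile PySem.Chars.isspace s).reverse).reverse
      = pvToks PySem.Chars.isspace []
          ((List.dropWhile PySem.Chars.isspace (List.dropWhile PySem.Chars.isspace s).reverse).reverse
            ++ (List.takeWhile PySem.Chars.isspace (List.dropWhile PySem.Chars.isspace s).reverse).reverse) := by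
        rw [pvToks_append_space]
        intro c hcmem
        exact List.mem_takeWhile_imp (List.mem_reverse.mp hcmem)
    _ = pvToks PySem.Chars.isspace [] (List.dropWhile PySem.Chars.isspace s) := by rw [hsplit]
    _ = pvToks PySem.Chars.isspace [] s := pvToks_lstrip s

-- the main invariant: comma-splitting + empty-filtering the whitespace tokens IS scanning with pvSep
theorem pv_main (L : List Char) : ∀ (p : List Char),
    List.filter (fun w => !w.isEmpty) (List.flatMap pvCS (pvToks PySem.Chars.isspace p L)) =
      List.filter (fun w => !w.isEmpty) (pvCS p).dropLast ++ pvToks pvSep ((pvCS p).getLastD []) L := by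
  induction L with
  | nil =>
    intro p
    have hsplit := pv_dropLast_getLastD (pvCS p) [] (pvCS_ne_nil p)
    by_cases hp : p = []
    · subst hp; simp [pvToks, pvCS]
    · have h1 : pvToks PySem.Chars.isspace p [] = [p] := by simp [pvToks, hp]
      have h2 : ∀ x : List Char, pvToks pvSep x [] =
          List.filter (fun w => !w.isEmpty) [x] := by
        intro x; cases x <;> simp [pvToks]
      rw [h1, h2, ← List.filter_append, hsplit]
      simp
  | cons c rest ih =>
    intro p
    have hsplit := pv_dropLast_getLastD (pvCS p) [] (pvCS_ne_nil p)
    have hfsplit : List.filter (fun w => !w.isEmpty) (pvCS p) =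
        List.filter (fun w => !w.isEmpty) (pvCS p).dropLast ++
          List.filter (fun w => !w.isEmpty) [(pvCS p).getLastD []] := by
      rw [← List.filter_append, hsplit]
    by_cases hsp : PySem.Chars.isspace c
    · have hq : pvSep c = true := by simp [pvSep, hsp]
      have hlast : ∀ x : List Char, pvToks pvSep x (c :: rest) =
          List.filter (fun w => !w.isEmpty) [x] ++ pvToks pvSep [] rest := by
        intro x; cases x <;> simp [pvToks, hq]
      by_cases hp : p = []
      · subst hp
        have hA : pvToks PySem.Chars.isspace [] (c :: rest) = pvToks PySem.Chars.isspace [] rest := by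
          simp [pvToks, hsp]
        rw [hA, ih [], hlast]
        simp [pvCS]
      · have hA : pvToks PySem.Chars.isspace p (c :: rest) = p :: pvToks PySem.Chars.isspace [] rest := by
          simp [pvToks, hsp, hp]
        rw [hA, List.flatMap_cons, List.filter_append, ih [], hlast, hfsplit]
        simp [pvCS, List.append_assoc]
    · by_cases hc : c = ','
      · subst hc
        have hq : pvSep ',' = true := by simp [pvSep]
        have hlast : ∀ x : List Char, pvToks pvSep x (',' :: rest) =
            List.filter (fun w => !w.isEmpty) [x] ++ pvToks pvSep [] rest := by
          intro x; cases x <;> simp [pvToks, hq]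
        have hA : pvToks PySem.Chars.isspace p (',' :: rest) =
            pvToks PySem.Chars.isspace (p ++ [',']) rest := by
          simp [pvToks, hsp]
        rw [hA, ih (p ++ [',']), pvCS_append_comma, List.dropLast_concat, List.getLastD_concat,
          hlast, hfsplit, List.append_assoc]
      · have hq : pvSep c = false := by simp [pvSep, hc, hsp]
        have hA : pvToks PySem.Chars.isspace p (c :: rest) =
            pvToks PySem.Chars.isspace (p ++ [c]) rest := by
          simp [pvToks, hsp]
        have hB : pvToks pvSep ((pvCS p).getLastD []) (c :: rest) =
            pvToks pvSep ((pvCS p).getLastD [] ++ [c]) rest := by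
          simp [pvToks, hq]
        rw [hA, hB, ih (p ++ [c]), pvCS_append_other p c hc, List.dropLast_concat,
          List.getLastD_concat]

-- B's foldl in terms of pvToks
def pvStepB (st : List String × List Char) (ch : Char) : List String × List Char :=
  if ch == ',' || PySem.Chars.isspace ch then
    (if st.2.isEmpty then st else (st.1 ++ [String.ofList st.2], []))
  else (st.1, st.2 ++ [ch])

theorem pv_foldB_core (L : List Char) : ∀ (parts : List String) (cur : List Char),
    (if (L.foldl pvStepB (parts, cur)).2.isEmpty then (L.foldl pvStepB (parts, cur)).1
     else (L.foldl pvStepB (parts, cur)).1 ++ [String.ofList (L.foldl pvStepB (parts, cur)).2]) =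
      parts ++ (pvToks pvSep cur L).map String.ofList := by
  induction L with
  | nil =>
    intro parts cur
    cases cur <;> simp [pvToks]
  | cons c rest ih =>
    intro parts cur
    simp only [List.foldl_cons]
    by_cases hq : (c == ',' || PySem.Chars.isspace c) = true
    · cases cur with
      | nil =>
        rw [show pvStepB (parts, []) c = (parts, []) by simp [pvStepB, hq]]
        rw [show pvToks pvSep [] (c :: rest) = pvToks pvSep [] rest by
          simp [pvToks, pvSep] at hq ⊢; rcases hq with h | h <;> simp [h]]
        exact ih parts []
      | cons d t =>
        rw [show pvStepB (parts, d :: t) c = (parts ++ [String.ofList (d :: t)], []) by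
          simp [pvStepB, hq]]
        rw [show pvToks pvSep (d :: t) (c :: rest) = (d :: t) :: pvToks pvSep [] rest by
          simp [pvToks, pvSep] at hq ⊢; rcases hq with h | h <;> simp [h]]
        simpa using ih (parts ++ [String.ofList (d :: t)]) []
    · rw [show pvStepB (parts, cur) c = (parts, cur ++ [c]) by simp [pvStepB, hq]]
      rw [show pvToks pvSep cur (c :: rest) = pvToks pvSep (cur ++ [c]) rest by
        have : pvSep c = false := by simpa [pvSep] using hq
        simp [pvToks, this]]
      exact ih parts (cur ++ [c])

-- the two string-level parts lists coincide
theorem pv_parts_eq (L : String) :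
    ((PySem.Str.split₀ (PySem.Str.strip L)).foldl
      (fun parts part =>
        if PySem.Str.isIn "," part then parts ++ (PySem.Str.split? part ",").getD []
        else parts ++ [part]) []).filter (fun p => p ≠ "") =
    (if (L.toList.foldl pvStepB ([], [])).2.isEmpty then (L.toList.foldl pvStepB ([], [])).1
     else (L.toList.foldl pvStepB ([], [])).1 ++ [String.ofList (L.toList.foldl pvStepB ([], [])).2]) := by
  rw [pv_foldB_core]
  have hfold : ∀ (ws : List String) (acc : List String),
      ws.foldl (fun parts part =>
        if PySem.Str.isIn "," part then parts ++ (PySem.Str.split? part ",").getD []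
        else parts ++ [part]) acc =
      acc ++ ws.flatMap (fun part =>
        if PySem.Str.isIn "," part then (PySem.Str.split? part ",").getD [] else [part]) := by
    intro ws
    induction ws with
    | nil => simp
    | cons w ws' ih =>
      intro acc
      rw [List.foldl_cons, ih, List.flatMap_cons]
      split_ifs <;> rw [List.append_assoc]
  rw [hfold, List.nil_append]
  have hsplit0 : PySem.Str.split₀ (PySem.Str.strip L) =
      (pvToks PySem.Chars.isspace [] L.toList).map String.ofList := by
    rw [PySem.Str.split₀, PySem.Str.toList_strip, split0_eq, pvToks_strip]
  rw [hsplit0]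
  have hbranch : ∀ w : List Char,
      (if PySem.Str.isIn "," (String.ofList w) then (PySem.Str.split? (String.ofList w) ",").getD []
       else [String.ofList w]) = (pvCS w).map String.ofList := by
    intro w
    by_cases hmem : ',' ∈ w
    · have hin : PySem.Str.isIn "," (String.ofList w) = true := by
        rw [PySem.Str.isIn, String.toList_ofList, PySem.Chars.isIn_iff_infix]
        obtain ⟨s, t, rfl⟩ := List.append_of_mem hmem
        exact ⟨s, t, by simp⟩
      rw [if_pos hin, PySem.Str.split?, PySem.Chars.split?]
      simp [splitOn_comma]
    · have hin : PySem.Chars.isIn [','] w = false := by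
        rw [PySem.Chars.isIn_eq_false_iff]
        rintro ⟨s, t, rfl⟩
        exact hmem (by simp)
      rw [if_neg (by simp [PySem.Str.isIn, hin]), pvCS_no_comma w hmem]
      simp
  rw [List.flatMap_map]
  have hflat : (List.flatMap (fun w =>
      if PySem.Str.isIn "," (String.ofList w) then (PySem.Str.split? (String.ofList w) ",").getD []
      else [String.ofList w]) (pvToks PySem.Chars.isspace [] L.toList)) =
      ((pvToks PySem.Chars.isspace [] L.toList).flatMap pvCS).map String.ofList := by
    rw [List.map_flatMap]
    exact List.flatMap_congr (fun w _ => hbranch w)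
  rw [hflat, List.filter_map]
  have hpred : ((fun p => decide (p ≠ "")) ∘ String.ofList) = fun w => !w.isEmpty := by
    funext w
    simp only [Function.comp]
    cases w with
    | nil => simp
    | cons c cs =>
      simp only [List.isEmpty_cons, Bool.not_false, decide_eq_true_iff]
      intro h
      have := congrArg String.toList h
      simp at this
  rw [hpred, pv_main L.toList []]
  simp [pvCS]

-- ===== VERDICT (by name: the statement is the Claim_ definition above) =====
theorem normalize_fio_spec : Claim_equal_normalize_fio := by
  intro contact _
  unfold Spec_normalize_fio normalize_fio normalize_fio_alt
  have h : (((PySem.Str.split₀ (PySem.Str.strip (PySem.Str.join " " (PySem.List.slice contact none (some 3))))).foldl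
      (fun parts part =>
        if PySem.Str.isIn "," part then parts ++ (PySem.Str.split? part ",").getD []
        else parts ++ [part]) []).filter (fun p => p ≠ "")) =
      (if ((PySem.Str.join " " (PySem.List.slice contact none (some 3))).toList.foldl
            (fun (st : List String × List Char) ch =>
              if ch == ',' || PySem.Chars.isspace ch then
                (if st.2.isEmpty then st else (st.1 ++ [String.ofList st.2], []))
              else (st.1, st.2 ++ [ch])) ([], [])).2.isEmpty
       then ((PySem.Str.join " " (PySem.List.slice contact none (some 3))).toList.foldl
            (fun (st : List String × List Char) ch =>
              if ch == ',' || PySem.Chars.isspace ch then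
                (if st.2.isEmpty then st else (st.1 ++ [String.ofList st.2], []))
              else (st.1, st.2 ++ [ch])) ([], [])).1
       else ((PySem.Str.join " " (PySem.List.slice contact none (some 3))).toList.foldl
            (fun (st : List String × List Char) ch =>
              if ch == ',' || PySem.Chars.isspace ch then
                (if st.2.isEmpty then st else (st.1 ++ [String.ofList st.2], []))
              else (st.1, st.2 ++ [ch])) ([], [])).1
          ++ [String.ofList ((PySem.Str.join " " (PySem.List.slice contact none (some 3))).toList.foldl
            (fun (st : List String × List Char) ch =>
              if ch == ',' || PySem.Chars.isspace ch then
                (if st.2.isEmpty then st else (st.1 ++ [String.ofList st.2], []))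
              else (st.1, st.2 ++ [ch])) ([], [])).2]) :=
    pv_parts_eq (PySem.Str.join " " (PySem.List.slice contact none (some 3)))
  simp only [normalize_fio, normalize_fio_alt]
  rw [h]
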